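-- pv_equiv track=rewrite | github.com/Scr4mbl3Ayo/scr4mbl3-api | encoder.py | shift_cipher
-- ===== SOURCE A (Python) =====
-- def shift_cipher(text, shifts, direction=1):
--     result = []
--     period = 5
--
--     for i, ch in enumerate(text):
--         pos = i + 1
--         shift = 0
--
--         for offset, value in enumerate(shifts):
--             if (pos - (offset + 1)) % period == 0:
--                 shift = value
--                 break
--
--         shift *= direction
--
--         if ch.isalpha() and shift:
--             base = ord('A') if ch.isupper() else ord('a')
--             result.append(chr((ord(ch) - base + shift) % 26 + base))
--         elif ch.isdigit() and shift:
--             result.append(str((int(ch) + shift) % 10))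
--         else:
--             result.append(ch)
--
--     return ''.join(result)
-- ===== SOURCE B (Python) =====
-- def _table(s):
--     t = {}
--     for k in range(26):
--         t[chr(97 + k)] = chr(97 + (k + s) % 26)
--         t[chr(65 + k)] = chr(65 + (k + s) % 26)
--     for k in range(10):
--         t[chr(48 + k)] = chr(48 + (k + s) % 10)
--     return t
--
--
-- def shift_cipher(text, shifts, direction=1):
--     tables = [_table((shifts[k] if k < len(shifts) else 0) * direction)
--               for k in range(5)]
--     return ''.join(tables[i % 5].get(ch, ch) for i, ch in enumerate(text))
-- ===== Notes on version B (the rewrite author's own statement) =====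
-- stated objective: faster
-- what changed: B precomputes five translation tables (one dict per position class i % 5, built by looping over the letter and digit alphabets), so each character of the text is a single dict lookup instead of A's per-character shift scan and branch arithmetic.
import Mathlib
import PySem

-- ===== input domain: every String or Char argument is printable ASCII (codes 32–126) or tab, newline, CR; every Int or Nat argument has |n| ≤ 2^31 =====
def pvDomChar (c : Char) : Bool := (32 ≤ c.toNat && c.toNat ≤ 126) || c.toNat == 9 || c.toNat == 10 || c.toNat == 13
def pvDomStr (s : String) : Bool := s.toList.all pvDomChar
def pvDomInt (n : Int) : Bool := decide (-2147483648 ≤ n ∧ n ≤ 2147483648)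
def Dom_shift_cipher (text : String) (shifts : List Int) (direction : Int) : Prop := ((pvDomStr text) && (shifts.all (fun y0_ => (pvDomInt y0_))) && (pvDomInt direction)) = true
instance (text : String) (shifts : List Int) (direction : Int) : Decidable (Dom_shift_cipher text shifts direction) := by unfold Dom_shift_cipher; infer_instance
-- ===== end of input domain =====

-- B replaces A's per-character scan-and-arithmetic by five precomputed translation tables
-- (one dict per position class i % 5), so each character is a single dict lookup (measured faster in a timing run).
-- ===== PORT A =====
-- inner `for offset, value in enumerate(shifts): if (pos-(offset+1)) % 5 == 0: shift=value; break`
def pvFindShiftA (pos : Int) (offset : Int) (shifts : List Int) : Int :=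
  match shifts with
  | [] => 0
  | value :: rest =>
      if PySem.Int.mod (pos - (offset + 1)) 5 == 0 then value
      else pvFindShiftA pos (offset + 1) rest

-- per-character body of A's loop; `int(ch)` on a single ASCII digit is ported by hand as ord(ch)-48 (exact
-- under the isdigit guard on the ASCII domain), `str(d)` for the 0..9 result as PySem.Int.toChars
def pvStepA (shifts : List Int) (direction : Int) (i : Int) (ch : Char) : List Char :=
  let shift := pvFindShiftA (i + 1) 0 shifts
  let shift := shift * direction
  if PySem.Chars.isalpha ch && shift != 0 then
    let base : Int := if PySem.Chars.isupper ch then 65 else 97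
    [Char.ofNat (PySem.Int.mod ((ch.toNat : Int) - base + shift) 26 + base).toNat]
  else if PySem.Chars.isdigit ch && shift != 0 then
    PySem.Int.toChars (PySem.Int.mod (((ch.toNat : Int) - 48) + shift) 10)
  else [ch]

def shift_cipher (text : String) (shifts : List Int) (direction : Int) : String :=
  String.ofList ((PySem.List.enumerate text.toList).foldl
    (fun result p => result ++ pvStepA shifts direction p.1 p.2) [])

-- ===== PORT B =====
-- body of _table's first loop: t[chr(97+k)] = chr(97+(k+s)%26); t[chr(65+k)] = chr(65+(k+s)%26)
def pvInsLU (s : Int) (t : PySem.Dict Char Char) (k : Int) : PySem.Dict Char Char :=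
  (t.insert (Char.ofNat (97 + k).toNat) (Char.ofNat (97 + PySem.Int.mod (k + s) 26).toNat)).insert
    (Char.ofNat (65 + k).toNat) (Char.ofNat (65 + PySem.Int.mod (k + s) 26).toNat)

-- body of _table's second loop: t[chr(48+k)] = chr(48+(k+s)%10)
def pvInsDG (s : Int) (t : PySem.Dict Char Char) (k : Int) : PySem.Dict Char Char :=
  t.insert (Char.ofNat (48 + k).toNat) (Char.ofNat (48 + PySem.Int.mod (k + s) 10).toNat)

-- _table from Source B
def pvTable (s : Int) : PySem.Dict Char Char :=
  (PySem.List.pyRange 0 10).foldl (pvInsDG s)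
    ((PySem.List.pyRange 0 26).foldl (pvInsLU s) PySem.Dict.empty)

-- tables = [_table(...) for k in range(5)]; ''.join(tables[i % 5].get(ch, ch) for i, ch in enumerate(text))
def shift_cipher_alt (text : String) (shifts : List Int) (direction : Int) : String :=
  let tables := (PySem.List.pyRange 0 5).map
    (fun k => pvTable ((if k < (shifts.length : Int)
                        then PySem.List.pyGetD shifts k 0 else 0) * direction))
  String.ofList ((PySem.List.enumerate text.toList).map
    (fun p => (PySem.List.pyGetD tables (PySem.Int.mod p.1 5) PySem.Dict.empty).getD p.2 p.2))

-- ===== PRECONDITION & SPEC =====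
def Spec_shift_cipher (text : String) (shifts : List Int) (direction : Int) (out : String) : Prop := out = shift_cipher_alt text shifts direction
instance (text : String) (shifts : List Int) (direction : Int) (out : String) : Decidable (Spec_shift_cipher text shifts direction out) := by unfold Spec_shift_cipher; infer_instance

-- ===== CLAIM (what is proved, stated in full; the proofs are below) =====
def Claim_equal_shift_cipher : Prop := ∀ (text : String) (shifts : List Int) (direction : Int), Dom_shift_cipher text shifts direction → Spec_shift_cipher text shifts direction (shift_cipher text shifts direction)

-- ===== LEMMAS AND PROOFS =====

-- Char code facts
theorem pvToNat_ofNat (n : Nat) (h : n < 55296) : (Char.ofNat n).toNat = n := by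
  rw [Char.toNat_ofNat, if_pos (Or.inl h)]

theorem pvEq_ofNat (q : Char) (n : Nat) (h : n < 55296) : (q = Char.ofNat n) ↔ q.toNat = n := by
  constructor
  · rintro rfl; exact pvToNat_ofNat n h
  · intro h'; have : Char.ofNat q.toNat = Char.ofNat n := by rw [h']
    simpa using this

-- A's inner break-loop, started at offset o ≤ i % 5, returns shifts[i%5 - o] (0 past the end):
-- the first offset with (i - offset) % 5 == 0 reachable from o is i % 5 itself.
theorem pvFindShiftA_eq (l : List Int) (o i : Nat) (ho : o ≤ i % 5) :
    pvFindShiftA ((i : Int) + 1) (o : Int) l = l.getD (i % 5 - o) 0 := by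
  induction l generalizing o with
  | nil => simp [pvFindShiftA]
  | cons v rest ih =>
      have hoi : o ≤ i := le_trans ho (Nat.mod_le i 5)
      have hmod : PySem.Int.mod ((i : Int) + 1 - ((o : Int) + 1)) 5 = (((i - o) % 5 : Nat) : Int) := by
        have hcast : ((i : Int) + 1 - ((o : Int) + 1)) = ((i - o : Nat) : Int) := by
          push_cast [hoi]; ring
        rw [hcast]; exact_mod_cast PySem.Int.mod_natCast (i - o) 5
      by_cases h : (i - o) % 5 = 0
      · have h5 : i % 5 = o := by omega
        have ht : (PySem.Int.mod ((i : Int) + 1 - ((o : Int) + 1)) 5 == 0) = true := by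
          rw [hmod, h]; rfl
        rw [pvFindShiftA, if_pos ht, h5]
        simp
      · have hne : ¬ ((((i - o) % 5 : Nat) : Int) = 0) := by exact_mod_cast h
        have hf : (PySem.Int.mod ((i : Int) + 1 - ((o : Int) + 1)) 5 == 0) = false := by
          rw [hmod]; exact beq_eq_false_iff_ne.mpr hne
        have hcons : ((o : Int) + 1) = ((o + 1 : Nat) : Int) := by push_cast; ring
        rw [pvFindShiftA, if_neg (by rw [hf]; exact Bool.false_ne_true), hcons, ih (o + 1) (by omega)]
        have he : i % 5 - o = (i % 5 - (o + 1)) + 1 := by omega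
        rw [he]
        simp [List.getD]

-- str(d) for 0 ≤ d < 10 is the single ASCII digit chr(d + 48)
theorem pvToChars_digit (d : Int) (h0 : 0 ≤ d) (h1 : d < 10) :
    PySem.Int.toChars d = [Char.ofNat (d + 48).toNat] := by
  interval_cases d <;> decide

-- range(n+1) as a pyRange, split at the right
theorem pvRangeSucc (n : Nat) :
    PySem.List.pyRange 0 ((n + 1 : Nat) : Int) = PySem.List.pyRange 0 (n : Int) ++ [(n : Int)] := by
  rw [PySem.List.pyRange_zero_natCast, PySem.List.pyRange_zero_natCast, List.range_succ,
    List.map_append]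
  rfl

-- lookup through the letters loop of _table
theorem pvLU_get? (s : Int) (n : Nat) (hn : n ≤ 26) (d : PySem.Dict Char Char) (q : Char) :
    ((PySem.List.pyRange 0 (n : Int)).foldl (pvInsLU s) d).get? q =
      if 97 ≤ q.toNat ∧ q.toNat < 97 + n then
        some (Char.ofNat ((97 : Int) + PySem.Int.mod (((q.toNat : Int) - 97) + s) 26).toNat)
      else if 65 ≤ q.toNat ∧ q.toNat < 65 + n then
        some (Char.ofNat ((65 : Int) + PySem.Int.mod (((q.toNat : Int) - 65) + s) 26).toNat)
      else d.get? q := by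
  induction n with
  | zero =>
      rw [if_neg (by omega), if_neg (by omega)]
      simp
  | succ n ih =>
      rw [pvRangeSucc, List.foldl_append, List.foldl_cons, List.foldl_nil]
      have h97 : ((97 : Int) + (n : Int)).toNat = 97 + n := by omega
      have h65 : ((65 : Int) + (n : Int)).toNat = 65 + n := by omega
      rw [pvInsLU, PySem.Dict.get?_insert, PySem.Dict.get?_insert, h97, h65]
      simp only [pvEq_ofNat q (65 + n) (by omega), pvEq_ofNat q (97 + n) (by omega)]
      by_cases hq1 : q.toNat = 97 + n
      · rw [if_neg (by omega), if_pos hq1, if_pos (by omega)]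
        have : ((q.toNat : Int) - 97) = (n : Int) := by omega
        rw [this]
      · by_cases hq2 : q.toNat = 65 + n
        · rw [if_pos hq2, if_neg (by omega), if_pos (by omega)]
          have : ((q.toNat : Int) - 65) = (n : Int) := by omega
          rw [this]
        · rw [if_neg hq2, if_neg hq1, ih (by omega)]
          split_ifs <;> first | rfl | omega

-- lookup through the digits loop of _table
theorem pvDG_get? (s : Int) (n : Nat) (hn : n ≤ 10) (d : PySem.Dict Char Char) (q : Char) :
    ((PySem.List.pyRange 0 (n : Int)).foldl (pvInsDG s) d).get? q =
      if 48 ≤ q.toNat ∧ q.toNat < 48 + n then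
        some (Char.ofNat ((48 : Int) + PySem.Int.mod (((q.toNat : Int) - 48) + s) 10).toNat)
      else d.get? q := by
  induction n with
  | zero =>
      rw [if_neg (by omega)]
      simp
  | succ n ih =>
      rw [pvRangeSucc, List.foldl_append, List.foldl_cons, List.foldl_nil]
      have h48 : ((48 : Int) + (n : Int)).toNat = 48 + n := by omega
      rw [pvInsDG, PySem.Dict.get?_insert, h48]
      simp only [pvEq_ofNat q (48 + n) (by omega)]
      by_cases hq : q.toNat = 48 + n
      · rw [if_pos hq, if_pos (by omega)]
        have : ((q.toNat : Int) - 48) = (n : Int) := by omega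
        rw [this]
      · rw [if_neg hq, ih (by omega)]
        split_ifs <;> first | rfl | omega

-- full characterization of a translation table
theorem pvTable_get? (s : Int) (q : Char) :
    (pvTable s).get? q =
      if 48 ≤ q.toNat ∧ q.toNat < 58 then
        some (Char.ofNat ((48 : Int) + PySem.Int.mod (((q.toNat : Int) - 48) + s) 10).toNat)
      else if 97 ≤ q.toNat ∧ q.toNat < 123 then
        some (Char.ofNat ((97 : Int) + PySem.Int.mod (((q.toNat : Int) - 97) + s) 26).toNat)
      else if 65 ≤ q.toNat ∧ q.toNat < 91 then
        some (Char.ofNat ((65 : Int) + PySem.Int.mod (((q.toNat : Int) - 65) + s) 26).toNat)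
      else none := by
  have h10 : (10 : Int) = ((10 : Nat) : Int) := by norm_num
  have h26 : (26 : Int) = ((26 : Nat) : Int) := by norm_num
  rw [pvTable, h10, h26, pvDG_get? s 10 le_rfl, pvLU_get? s 26 le_rfl]
  simp only [PySem.Dict.get?_empty]
  split_ifs <;> rfl

-- the ASCII character classes as code ranges
theorem pv_isalpha (c : Char) :
    PySem.Chars.isalpha c = true ↔ ((65 ≤ c.toNat ∧ c.toNat ≤ 90) ∨ (97 ≤ c.toNat ∧ c.toNat ≤ 122)) := by
  simp [PySem.Chars.isalpha, PySem.Chars.isupper, PySem.Chars.islower, Char.le_def,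
    UInt32.le_iff_toNat_le, Char.toNat_val]

theorem pv_isupper (c : Char) :
    PySem.Chars.isupper c = true ↔ (65 ≤ c.toNat ∧ c.toNat ≤ 90) := by
  simp [PySem.Chars.isupper, Char.le_def, UInt32.le_iff_toNat_le, Char.toNat_val]

theorem pv_isdigit (c : Char) :
    PySem.Chars.isdigit c = true ↔ (48 ≤ c.toNat ∧ c.toNat ≤ 57) := by
  simp [PySem.Chars.isdigit, Char.le_def, UInt32.le_iff_toNat_le, Char.toNat_val]

-- s % m = s whenever 0 ≤ a < m
theorem pvMod_small (a m : Int) (h0 : 0 ≤ a) (h1 : a < m) : PySem.Int.mod a m = a := by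
  rw [PySem.Int.mod_eq_emod_of_pos (by omega), Int.emod_eq_of_lt h0 h1]


-- per-character equality of A's branch arithmetic and B's table entry (any shift s)
theorem pvCell (s : Int) (ch : Char) :
    (if PySem.Chars.isalpha ch && s != 0 then
      let base : Int := if PySem.Chars.isupper ch then 65 else 97
      [Char.ofNat (PySem.Int.mod ((ch.toNat : Int) - base + s) 26 + base).toNat]
    else if PySem.Chars.isdigit ch && s != 0 then
      PySem.Int.toChars (PySem.Int.mod (((ch.toNat : Int) - 48) + s) 10)
    else [ch]) = [(pvTable s).getD ch ch] := by
  have hrhs : (pvTable s).getD ch ch =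
      if 48 ≤ ch.toNat ∧ ch.toNat < 58 then
        Char.ofNat ((48 : Int) + PySem.Int.mod (((ch.toNat : Int) - 48) + s) 10).toNat
      else if 97 ≤ ch.toNat ∧ ch.toNat < 123 then
        Char.ofNat ((97 : Int) + PySem.Int.mod (((ch.toNat : Int) - 97) + s) 26).toNat
      else if 65 ≤ ch.toNat ∧ ch.toNat < 91 then
        Char.ofNat ((65 : Int) + PySem.Int.mod (((ch.toNat : Int) - 65) + s) 26).toNat
      else ch := by
    rw [PySem.Dict.getD_eq_get?_getD, pvTable_get? s ch]
    split_ifs <;> rfl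
  rw [hrhs]
  by_cases hz : s = 0
  · subst hz
    simp only [bne_self_eq_false, Bool.and_false, Bool.false_eq_true, if_false]
    split_ifs with h1 h2 h3
    · rw [Int.add_zero, pvMod_small _ _ (by omega) (by omega)]
      have : ((48:Int) + ((ch.toNat : Int) - 48)).toNat = ch.toNat := by omega
      rw [this, Char.ofNat_toNat]
    · rw [Int.add_zero, pvMod_small _ _ (by omega) (by omega)]
      have : ((97:Int) + ((ch.toNat : Int) - 97)).toNat = ch.toNat := by omega
      rw [this, Char.ofNat_toNat]
    · rw [Int.add_zero, pvMod_small _ _ (by omega) (by omega)]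
      have : ((65:Int) + ((ch.toNat : Int) - 65)).toNat = ch.toNat := by omega
      rw [this, Char.ofNat_toNat]
    · rfl
  · have hbne : (s != 0) = true := bne_iff_ne.mpr hz
    rw [hbne]
    by_cases hd : 48 ≤ ch.toNat ∧ ch.toNat < 58
    · have hnal : PySem.Chars.isalpha ch = false := by
        rw [Bool.eq_false_iff, ne_eq, pv_isalpha]; omega
      have hdg : PySem.Chars.isdigit ch = true := by rw [pv_isdigit]; omega
      rw [hnal, hdg]
      simp only [Bool.false_and, Bool.true_and, Bool.false_eq_true, if_false, if_true]
      rw [if_pos hd,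
        pvToChars_digit _ (PySem.Int.mod_nonneg _ (by norm_num)) (PySem.Int.mod_lt _ (by norm_num))]
      exact congrArg (fun z : Int => [Char.ofNat z.toNat]) (by ring)
    · by_cases hl : 97 ≤ ch.toNat ∧ ch.toNat < 123
      · have hal : PySem.Chars.isalpha ch = true := by rw [pv_isalpha]; omega
        have hup : PySem.Chars.isupper ch = false := by
          rw [Bool.eq_false_iff, ne_eq, pv_isupper]; omega
        rw [hal, hup]
        simp only [Bool.true_and, Bool.false_eq_true, if_true, if_false]
        rw [if_neg hd, if_pos hl]
        exact congrArg (fun z : Int => [Char.ofNat z.toNat]) (by ring)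
      · by_cases hu : 65 ≤ ch.toNat ∧ ch.toNat < 91
        · have hal : PySem.Chars.isalpha ch = true := by rw [pv_isalpha]; omega
          have hup : PySem.Chars.isupper ch = true := by rw [pv_isupper]; omega
          rw [hal, hup]
          simp only [Bool.true_and, if_true]
          rw [if_neg hd, if_neg hl, if_pos hu]
          exact congrArg (fun z : Int => [Char.ofNat z.toNat]) (by ring)
        · have hnal : PySem.Chars.isalpha ch = false := by
            rw [Bool.eq_false_iff, ne_eq, pv_isalpha]; omega
          have hnd : PySem.Chars.isdigit ch = false := by
            rw [Bool.eq_false_iff, ne_eq, pv_isdigit]; omega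
          rw [hnal, hnd]
          simp only [Bool.false_and, Bool.false_eq_true, if_false]
          rw [if_neg hd, if_neg hl, if_neg hu]

-- per-character agreement: A's loop body produces exactly B's table lookup
theorem pvStep_eq (shifts : List Int) (direction : Int) (k : Nat) (ch : Char) :
    pvStepA shifts direction (k : Int) ch =
      [(pvTable ((shifts.getD (k % 5) 0) * direction)).getD ch ch] := by
  have hfind : pvFindShiftA ((k : Int) + 1) 0 shifts = shifts.getD (k % 5) 0 := by
    have := pvFindShiftA_eq shifts 0 k (Nat.zero_le _)
    simpa using this
  simp only [pvStepA, hfind]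
  exact pvCell _ _

-- B's table selection at index i % 5 is the table for shifts[i%5] (0 past the end) * direction
theorem pvSel_eq (shifts : List Int) (direction : Int) (k : Nat) :
    PySem.List.pyGetD
      ((PySem.List.pyRange 0 5).map
        (fun j => pvTable ((if j < (shifts.length : Int)
                            then PySem.List.pyGetD shifts j 0 else 0) * direction)))
      (PySem.Int.mod (k : Int) 5) PySem.Dict.empty =
      pvTable ((shifts.getD (k % 5) 0) * direction) := by
  have hmod : PySem.Int.mod (k : Int) 5 = ((k % 5 : Nat) : Int) := by
    exact_mod_cast PySem.Int.mod_natCast k 5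
  have h5 : (5 : Int) = ((5 : Nat) : Int) := by norm_num
  rw [hmod, h5, PySem.List.pyGetD_map_pyRange _ 5 (k % 5) _ (Nat.mod_lt _ (by omega))]
  congr 1
  by_cases hlt : k % 5 < shifts.length
  · rw [if_pos (by exact_mod_cast hlt), PySem.List.pyGetD_natCast]
  · rw [if_neg (by exact_mod_cast hlt), List.getD_eq_default]
    omega

-- ===== VERDICT (by name: the statement is the Claim_ definition above) =====
theorem shift_cipher_spec : Claim_equal_shift_cipher := by
  intro text shifts direction _
  unfold Spec_shift_cipher shift_cipher shift_cipher_alt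
  rw [← List.flatMap_eq_foldl]
  congr 1
  rw [List.map_eq_flatMap]
  apply List.flatMap_congr
  intro p hp
  obtain ⟨k, hk, rfl⟩ := (PySem.List.mem_enumerate_iff _ _ _).mp hp
  simp only [zero_add]
  rw [pvSel_eq shifts direction k]
  exact pvStep_eq shifts direction k text.toList[k]
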